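-- pv_equiv track=rewrite | github.com/ratanlal02/StoVer | configure/vehicle.py | matrix_space
-- ===== SOURCE A (Python) =====
-- def matrix_space(n, L, U):
-- 	'''
-- 	input:
-- 		n - number of vehicles
-- 		L - lower limit for each entry
-- 		U - upper limit for each entry
--
-- 	output:
-- 		L - an interval list of size 2nx2n
-- 	'''
-- 	M = []
-- 	for i in range(2*n):
-- 		temp = [[0, 0] for j in range(2*n)];
-- 		if i%2!=0:
-- 			temp[i-1][0] = L;
-- 			temp[i-1][1] = U;
-- 			temp[i][0] = L;
-- 			temp[i][1] = U;
-- 		else: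
-- 			temp[i][0] = L;
-- 			temp[i][1] = U;
-- 			temp[i+1][0] = L;
-- 			temp[i+1][1] = U;
-- 		M.append(temp);
--
-- 	List = []
-- 	low = []
-- 	high = []
-- 	for i in range(2*n):
-- 		for j in range(2*n):
-- 			low.append(M[i][j][0])
-- 			high.append(M[i][j][1])
-- 	List.append(low)
-- 	List.append(high)
--
-- 	return List
-- ===== SOURCE B (Python) =====
-- def matrix_space(n, L, U):
--     low = []
--     high = []
--     for i in range(2 * n):
--         for j in range(2 * n):
--             if i // 2 == j // 2:
--                 low.append(L)
--                 high.append(U)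
--             else:
--                 low.append(0)
--                 high.append(0)
--     return [low, high]
-- ===== Notes on version B (the rewrite author's own statement) =====
-- stated objective: simpler
-- what changed: B never builds the nested 2n x 2n matrix: it emits the two flat lists directly in one nested loop using the block-diagonal predicate i//2 == j//2, eliminating A's adjacency-based row construction and the separate flattening pass (no intermediate matrix allocation).
import Mathlib
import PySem

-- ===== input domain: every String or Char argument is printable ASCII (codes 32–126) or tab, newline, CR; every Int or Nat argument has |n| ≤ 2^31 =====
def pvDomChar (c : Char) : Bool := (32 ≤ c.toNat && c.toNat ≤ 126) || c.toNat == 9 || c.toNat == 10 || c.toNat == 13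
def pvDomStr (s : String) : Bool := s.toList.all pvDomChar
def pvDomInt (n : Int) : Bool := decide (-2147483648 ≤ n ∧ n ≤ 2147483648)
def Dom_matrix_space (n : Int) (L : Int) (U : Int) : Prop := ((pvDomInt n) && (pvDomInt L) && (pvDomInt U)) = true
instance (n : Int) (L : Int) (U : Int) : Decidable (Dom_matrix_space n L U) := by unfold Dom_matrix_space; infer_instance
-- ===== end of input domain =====

-- B drops A's nested-matrix construction and flattening pass: one nested loop emits the
-- flat low/high lists directly via the block-diagonal predicate i//2 == j//2 (objective: simpler).

-- ===== PORT A =====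
-- temp[i][k] = v  (read row i, set component k; A's indices are always in range)
def pvSetIn (xs : List (List Int)) (i : Nat) (k : Nat) (v : Int) : List (List Int) :=
  xs.set i ((xs.getD i []).set k v)

-- one iteration of A's first loop: the row appended to M at index i
def pvRowA (tn : Nat) (L : Int) (U : Int) (i : Nat) : List (List Int) :=
  let temp := (List.range tn).map (fun _ => ([0, 0] : List Int))
  if i % 2 ≠ 0 then
    pvSetIn (pvSetIn (pvSetIn (pvSetIn temp (i - 1) 0 L) (i - 1) 1 U) i 0 L) i 1 U
  else
    pvSetIn (pvSetIn (pvSetIn (pvSetIn temp i 0 L) i 1 U) (i + 1) 0 L) (i + 1) 1 U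

def matrix_space (n : Int) (L : Int) (U : Int) : List (List Int) :=
  let tn := (2 * n).toNat
  let M := (List.range tn).map (pvRowA tn L U)
  let low := (List.range tn).foldl (fun acc i =>
    (List.range tn).foldl (fun acc2 j => acc2 ++ [((M.getD i []).getD j []).getD 0 0]) acc) []
  let high := (List.range tn).foldl (fun acc i =>
    (List.range tn).foldl (fun acc2 j => acc2 ++ [((M.getD i []).getD j []).getD 1 0]) acc) []
  [low, high]

-- ===== PORT B =====
def matrix_space_alt (n : Int) (L : Int) (U : Int) : List (List Int) :=
  let tn := (2 * n).toNat
  let p := (List.range tn).foldl (fun p i =>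
    (List.range tn).foldl (fun (q : List Int × List Int) j =>
      if i / 2 = j / 2 then (q.1 ++ [L], q.2 ++ [U]) else (q.1 ++ [0], q.2 ++ [0])) p)
    ([], [])
  [p.1, p.2]

-- ===== PRECONDITION & SPEC =====
def Spec_matrix_space (n : Int) (L : Int) (U : Int) (out : List (List Int)) : Prop := out = matrix_space_alt n L U
instance (n : Int) (L : Int) (U : Int) (out : List (List Int)) : Decidable (Spec_matrix_space n L U out) := by unfold Spec_matrix_space; infer_instance

-- ===== CLAIM (what is proved, stated in full; the proofs are below) =====
def Claim_equal_matrix_space : Prop := ∀ (n : Int) (L : Int) (U : Int), Dom_matrix_space n L U → Spec_matrix_space n L U (matrix_space n L U)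

-- ===== LEMMAS AND PROOFS =====

-- the common normal form both ports are reduced to
def pvFlat (tn : Nat) (v : Int) : List Int :=
  (List.range tn).flatMap (fun i => (List.range tn).map (fun j => if j / 2 = i / 2 then v else 0))

lemma pvGetD_set (xs : List (List Int)) (a : Nat) (v : List Int) (b : Nat) :
    (xs.set a v).getD b [] = if a = b ∧ b < xs.length then v else xs.getD b [] := by
  simp only [List.getD_eq_getElem?_getD, List.getElem?_set]
  split_ifs <;> simp_all

-- A's row i has the block-diagonal shape: column j holds [L,U] iff j/2 = i/2, else [0,0]
lemma pvRowA_getD (tn : Nat) (L U : Int) (i : Nat) (hi : i < tn) (htn : tn % 2 = 0) (j : Nat) (hjtn : j < tn) :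
    (pvRowA tn L U i).getD j [] = if j / 2 = i / 2 then ([L, U] : List Int) else [0, 0] := by
  have hlen : ((List.range tn).map (fun _ => ([0, 0] : List Int))).length = tn := by simp
  simp only [pvRowA]
  by_cases hodd : i % 2 = 0
  · have h1 : i + 1 < tn := by omega
    rw [if_neg (by omega)]
    have hchain : pvSetIn (pvSetIn (pvSetIn (pvSetIn ((List.range tn).map (fun _ => ([0, 0] : List Int))) i 0 L) i 1 U) (i + 1) 0 L) (i + 1) 1 U
        = (((List.range tn).map (fun _ => ([0, 0] : List Int))).set i [L, U]).set (i + 1) [L, U] := by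
      simp only [pvSetIn, pvGetD_set, List.length_set, hlen,
        PySem.List.getD_map_range _ _ _ _ hi, PySem.List.getD_map_range _ _ _ _ h1]
      split_ifs <;> simp only [true_and, List.set_set] at * <;> first | rfl | omega
    rw [hchain]
    simp only [pvGetD_set, List.length_set, hlen, PySem.List.getD_map_range _ _ _ _ hjtn]
    split_ifs <;> first | rfl | omega
  · have h0 : 1 ≤ i := by omega
    have hm : i - 1 < tn := by omega
    rw [if_pos hodd]
    have hchain : pvSetIn (pvSetIn (pvSetIn (pvSetIn ((List.range tn).map (fun _ => ([0, 0] : List Int))) (i - 1) 0 L) (i - 1) 1 U) i 0 L) i 1 U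
        = (((List.range tn).map (fun _ => ([0, 0] : List Int))).set (i - 1) [L, U]).set i [L, U] := by
      simp only [pvSetIn, pvGetD_set, List.length_set, hlen,
        PySem.List.getD_map_range _ _ _ _ hi, PySem.List.getD_map_range _ _ _ _ hm]
      split_ifs <;> simp only [true_and, List.set_set] at * <;> first | rfl | omega
    rw [hchain]
    simp only [pvGetD_set, List.length_set, hlen, PySem.List.getD_map_range _ _ _ _ hjtn]
    split_ifs <;> first | rfl | omega

-- A's flatten loop, for either component k = 0 (value L) or k = 1 (value U)
lemma pvFlattenA (tn : Nat) (L U : Int) (htn : tn % 2 = 0) (k : Nat) (v : Int)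
    (hk : ∀ b : Prop, [_inst : Decidable b] → ((if b then ([L, U] : List Int) else [0, 0]).getD k 0) = if b then v else 0) :
    (List.range tn).foldl (fun acc i =>
      (List.range tn).foldl (fun acc2 j =>
        acc2 ++ [((((List.range tn).map (pvRowA tn L U)).getD i []).getD j []).getD k 0]) acc) []
    = pvFlat tn v := by
  have h1 : ∀ (acc : List Int), ∀ i ∈ List.range tn,
      (List.range tn).foldl (fun acc2 j =>
        acc2 ++ [((((List.range tn).map (pvRowA tn L U)).getD i []).getD j []).getD k 0]) acc
      = acc ++ (List.range tn).map (fun j => if j / 2 = i / 2 then v else 0) := by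
    intro acc i hi
    rw [List.mem_range] at hi
    rw [PySem.List.foldl_append_singleton_eq_map]
    congr 1
    apply List.map_congr_left
    intro j hj
    rw [List.mem_range] at hj
    rw [PySem.List.getD_map_range _ _ _ _ hi, pvRowA_getD tn L U i hi htn j hj, hk]
  rw [PySem.List.foldl_congr_mem _ _
      (fun acc i => acc ++ (List.range tn).map (fun j => if j / 2 = i / 2 then v else 0)) _ h1,
    PySem.List.foldl_append_eq_flatMap]
  simp [pvFlat]

lemma matrix_space_eq_flat (n L U : Int) :
    matrix_space n L U = [pvFlat (2 * n).toNat L, pvFlat (2 * n).toNat U] := by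
  have htn : (2 * n).toNat % 2 = 0 := by omega
  simp only [matrix_space]
  rw [pvFlattenA _ L U htn 0 L (by intro b _inst; split_ifs <;> rfl),
    pvFlattenA _ L U htn 1 U (by intro b _inst; split_ifs <;> rfl)]

lemma matrix_space_alt_eq_flat (n L U : Int) :
    matrix_space_alt n L U = [pvFlat (2 * n).toNat L, pvFlat (2 * n).toNat U] := by
  simp only [matrix_space_alt]
  have step1 : (List.range (2 * n).toNat).foldl (fun p i =>
      (List.range (2 * n).toNat).foldl (fun (q : List Int × List Int) j =>
        if i / 2 = j / 2 then (q.1 ++ [L], q.2 ++ [U]) else (q.1 ++ [0], q.2 ++ [0])) p)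
      (([], []) : List Int × List Int)
      = (List.range (2 * n).toNat).foldl (fun p i =>
        ((List.range (2 * n).toNat).foldl (fun acc j => acc ++ [if j / 2 = i / 2 then L else 0]) p.1,
         (List.range (2 * n).toNat).foldl (fun acc j => acc ++ [if j / 2 = i / 2 then U else 0]) p.2)) ([], []) := by
    apply PySem.List.foldl_congr_mem
    intro p i _
    have h1 : (fun (q : List Int × List Int) j =>
        if i / 2 = j / 2 then (q.1 ++ [L], q.2 ++ [U]) else (q.1 ++ [0], q.2 ++ [0]))
      = fun (q : List Int × List Int) j =>
        ((fun a e => a ++ [if e / 2 = i / 2 then L else 0]) q.1 j,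
         (fun a e => a ++ [if e / 2 = i / 2 then U else 0]) q.2 j) := by
      funext q j
      by_cases h : i / 2 = j / 2 <;> simp [h, eq_comm]
    rw [h1]
    exact PySem.List.foldl_prod_mk
      (fun a e => a ++ [if e / 2 = i / 2 then L else 0])
      (fun a e => a ++ [if e / 2 = i / 2 then U else 0])
      (List.range (2 * n).toNat) p.1 p.2
  have step2 := PySem.List.foldl_prod_mk
    (fun (a : List Int) (i : Nat) => (List.range (2 * n).toNat).foldl (fun acc j => acc ++ [if j / 2 = i / 2 then L else 0]) a)
    (fun (b : List Int) (i : Nat) => (List.range (2 * n).toNat).foldl (fun acc j => acc ++ [if j / 2 = i / 2 then U else 0]) b)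
    (List.range (2 * n).toNat) [] []
  rw [step1, step2]
  simp only [PySem.List.foldl_append_singleton_eq_map]
  rw [PySem.List.foldl_append_eq_flatMap, PySem.List.foldl_append_eq_flatMap]
  simp [pvFlat]

-- ===== VERDICT (by name: the statement is the Claim_ definition above) =====
theorem matrix_space_spec : Claim_equal_matrix_space := by
  intro n L U _
  show matrix_space n L U = matrix_space_alt n L U
  rw [matrix_space_eq_flat, matrix_space_alt_eq_flat]
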